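-- pv_equiv track=rewrite | github.com/yyyYangLiu/CISC499 | src/testing.py | deleteLabel
-- ===== SOURCE A (Python) =====
-- def deleteLabel(program):
--     set_jumps = {}
--     for label in program:
--         flag = True
--         for i in program[label]:
--             if "goto" == i[0] and flag:
--                 set_jumps[label] = i[1]
--                 flag = False
--
--     unreach = []
--     for L in set_jumps:
--         if L < set_jumps[L]:
--             key_number = int(L[1:])
--             value = int(set_jumps[L][1:])
--             d = value - (key_number + 1)
--             for i in range(d):
--                 unL = key_number + (i+1)
--                 unreach.append("L"+str(unL))
--
--     for label in unreach:
--         if label in program: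
--             del program[label]
--
--     return program
-- ===== SOURCE B (Python) =====
-- # Interval version: collect the (lo, hi) gap of every qualifying jump once, then
-- # keep exactly the entries whose label number falls outside all gaps.
-- # Return value only: A deletes keys of its argument dict in place, B returns a
-- # new dict and leaves the argument untouched.
-- def deleteLabel(program):
--     gaps = []
--     for label, body in program.items():
--         target = next((ins[1] for ins in body if ins[0] == "goto"), None)
--         if target is not None and label < target:
--             gaps.append((int(label[1:]) + 1, int(target[1:]) - 1))
--
--     def label_number(key):
--         """The integer after the leading 'L', or None if key has another form."""
--         if not key.startswith("L"):
--             return None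
--         tail = key[1:]
--         digits = tail[1:] if tail.startswith("-") else tail
--         if not digits.isdigit():
--             return None
--         return int(tail)
--
--     def unreachable(key):
--         n = label_number(key)
--         return n is not None and any(lo <= n <= hi for lo, hi in gaps)
--
--     return {k: v for k, v in program.items() if not unreachable(k)}
-- ===== Notes on version B (the rewrite author's own statement) =====
-- stated objective: alternative
-- what changed: Instead of materialising every 'L<i>' string in each qualifying jump gap and repeatedly deleting those keys from the dict, B collects the (lo, hi) gap intervals once and keeps, in one pass, exactly the entries whose label number lies outside all intervals; Pre_ additionally excludes programs with a key whose numeric 'L'-tail is spelt non-canonically (e.g. 'L02'), a malformed-label corner where A keeps and B deletes and either is defensible; A also deletes keys of its argument dict in place while B returns a new dict (return values agree).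
import Mathlib
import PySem

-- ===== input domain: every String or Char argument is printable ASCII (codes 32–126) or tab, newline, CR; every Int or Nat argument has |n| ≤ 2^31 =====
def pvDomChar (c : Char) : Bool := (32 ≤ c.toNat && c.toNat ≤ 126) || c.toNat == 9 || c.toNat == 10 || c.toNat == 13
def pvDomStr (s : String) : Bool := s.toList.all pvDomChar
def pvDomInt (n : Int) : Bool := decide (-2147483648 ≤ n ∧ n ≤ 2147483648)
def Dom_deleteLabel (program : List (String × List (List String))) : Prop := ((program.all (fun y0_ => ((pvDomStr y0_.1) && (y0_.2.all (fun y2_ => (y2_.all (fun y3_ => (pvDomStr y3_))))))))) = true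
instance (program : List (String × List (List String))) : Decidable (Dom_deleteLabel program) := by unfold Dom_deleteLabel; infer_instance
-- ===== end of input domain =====

-- One line: B replaces A's per-jump enumeration of every label string in the gap (and the repeated
-- dict deletions) by one pass that tests each entry's label number against the collected gap intervals.
-- Return value only: the Python A deletes keys of its argument dict in place, B returns a new dict.

-- first goto instruction of an instruction list (shared shape helper: both Pythons search
-- the first instruction whose head is "goto")
def dlGotoOf (instrs : List (List String)) : Option (List String) :=
  instrs.find? (fun ins => (PySem.List.pyGet? ins 0).getD "" == "goto")

-- ===== PORT A =====
-- "L" + str(n): string concatenation ported on code points (exact)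
def dlMkLabel (n : Int) : String := String.ofList ('L' :: PySem.Int.toChars n)

def deleteLabel (program : List (String × List (List String))) : List (String × List (List String)) :=
  -- set_jumps = {} ; for label in program: flag = True ; for i in program[label]: …
  let set_jumps : PySem.Dict String String :=
    program.foldl (fun sj kv =>
      (((((PySem.Dict.mk program).get? kv.1).getD []).foldl
          (fun (st : PySem.Dict String String × Bool) i =>
            if ((PySem.List.pyGet? i 0).getD "" == "goto") && st.2 then
              (st.1.insert kv.1 ((PySem.List.pyGet? i 1).getD ""), false)
            else st)
          (sj, true))).1)
      PySem.Dict.empty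
  -- unreach = [] ; for L in set_jumps: …
  let unreach : List String :=
    set_jumps.items.foldl (fun acc Lt =>
      if Lt.1 < Lt.2 then
        let key_number := (PySem.Int.ofStr? (PySem.Str.slice Lt.1 (some 1) none)).getD 0
        let value := (PySem.Int.ofStr? (PySem.Str.slice Lt.2 (some 1) none)).getD 0
        let d := value - (key_number + 1)
        (PySem.List.pyRange 0 d 1).foldl (fun acc2 i => acc2 ++ [dlMkLabel (key_number + (i + 1))]) acc
      else acc) []
  -- for label in unreach: if label in program: del program[label]
  (unreach.foldl (fun p label => if p.contains label then p.erase label else p)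
    (PySem.Dict.mk program)).items

-- ===== PORT B =====
-- label_number(key) of Source B: the integer after the leading 'L', or None
def dlLabelNum? (key : String) : Option Int :=
  if !(PySem.Str.startswith key "L") then none
  else
    let tail := PySem.Str.slice key (some 1) none
    let digits := if PySem.Str.startswith tail "-" then PySem.Str.slice tail (some 1) none else tail
    if !(PySem.Str.strIsdigit digits) then none
    else PySem.Int.ofStr? tail

-- unreachable(key) of Source B
def dlUnreachable (gaps : List (Int × Int)) (key : String) : Bool :=
  match dlLabelNum? key with
  | none => false
  | some n => gaps.any (fun g => decide (g.1 ≤ n) && decide (n ≤ g.2))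

def deleteLabel_alt (program : List (String × List (List String))) : List (String × List (List String)) :=
  let gaps : List (Int × Int) :=
    program.foldl (fun acc kv =>
      match dlGotoOf kv.2 with
      | none => acc
      | some ins =>
        let target := (PySem.List.pyGet? ins 1).getD ""
        if kv.1 < target then
          acc ++ [((PySem.Int.ofStr? (PySem.Str.slice kv.1 (some 1) none)).getD 0 + 1,
                   (PySem.Int.ofStr? (PySem.Str.slice target (some 1) none)).getD 0 - 1)]
        else acc) []
  program.filter (fun kv => !dlUnreachable gaps kv.1)

-- ===== PRECONDITION & SPEC =====
-- the key's 'L'-tail, if it is a signed digit string at all, is the canonical spelling str(int(tail))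
def dlKeyOkL (cs : List Char) : Bool :=
  if cs.head? == some 'L' then
    !(PySem.Chars.strIsdigit
        (if PySem.Chars.startswith (cs.drop 1) ['-'] then (cs.drop 1).drop 1 else cs.drop 1)) ||
      (PySem.Int.toChars ((PySem.Int.ofChars? (cs.drop 1)).getD 0) == cs.drop 1)
  else true

def dlKeyOk (k : String) : Bool := dlKeyOkL k.toList

-- Pre_ excludes (i) association lists with duplicate keys, which cannot arise from a Python dict
-- argument; (ii) exactly the inputs on which A raises: an empty instruction list (IndexError on
-- i[0]), a first goto instruction with no operand (IndexError on i[1]), and a qualifying jump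
-- whose label or target tail int() cannot parse (ValueError); and (iii) programs with a key whose
-- 'L'-tail is a signed digit string not in canonical str(int(..)) form (e.g. "L02"): A's
-- enumeration never spells labels that way, so whether such a malformed label counts as being in a
-- gap (B deletes, A keeps) is a corner where either answer is defensible.
def Pre_deleteLabel (program : List (String × List (List String))) : Prop :=
  (program.map Prod.fst).Nodup ∧
  (program.all fun kv =>
    (kv.2.all fun ins => !ins.isEmpty) &&
    dlKeyOk kv.1 &&
    (match dlGotoOf kv.2 with
     | none => true
     | some ins =>
       decide (2 ≤ ins.length) &&
       -- kernel-computable form of Python's 'kv.1 < target' (String < is List Char <, cf. String.lt_iff)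
       (!(decide (kv.1.toList < ((PySem.List.pyGet? ins 1).getD "").toList)) ||
         ((PySem.Int.ofStr? (PySem.Str.slice kv.1 (some 1) none)).isSome &&
          (PySem.Int.ofStr? (PySem.Str.slice ((PySem.List.pyGet? ins 1).getD "") (some 1) none)).isSome)))) = true
instance (program : List (String × List (List String))) : Decidable (Pre_deleteLabel program) := by
  unfold Pre_deleteLabel; infer_instance

def pvWitness_deleteLabel : (List (String × List (List String))) :=
  [("L0", [["set", "x"], ["goto", "L3"]]), ("L1", [["set", "y"]]), ("L2", [["set", "z"]]),
   ("L3", [["ret"]])]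

def Spec_deleteLabel (program : List (String × List (List String))) (out : List (String × List (List String))) : Prop := out = deleteLabel_alt program
instance (program : List (String × List (List String))) (out : List (String × List (List String))) : Decidable (Spec_deleteLabel program out) := by unfold Spec_deleteLabel; infer_instance

-- ===== CLAIM (what is proved, stated in full; the proofs are below) =====
def Claim_equal_deleteLabel : Prop := ∀ (program : List (String × List (List String))), Dom_deleteLabel program → Pre_deleteLabel program → Spec_deleteLabel program (deleteLabel program)

-- ===== LEMMAS AND PROOFS =====

-- proof-side abbreviations
def dlNum (s : String) : Int := (PySem.Int.ofStr? (PySem.Str.slice s (some 1) none)).getD 0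

def dlJumps (P : List (String × List (List String))) : List (String × String) :=
  P.filterMap (fun kv => (dlGotoOf kv.2).map (fun ins => (kv.1, (PySem.List.pyGet? ins 1).getD "")))

def dlGapLabels (Lt : String × String) : List String :=
  if Lt.1 < Lt.2 then
    (PySem.List.pyRange 0 (dlNum Lt.2 - (dlNum Lt.1 + 1)) 1).map (fun i => dlMkLabel (dlNum Lt.1 + (i + 1)))
  else []

def dlGapIv (kv : String × List (List String)) : List (Int × Int) :=
  match dlGotoOf kv.2 with
  | none => []
  | some ins =>
    let target := (PySem.List.pyGet? ins 1).getD ""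
    if kv.1 < target then [(dlNum kv.1 + 1, dlNum target - 1)] else []

-- decimal value of a digit string
def dlVal (ds : List Char) : Nat := ds.foldl (fun a c => a * 10 + (c.toNat - 48)) 0

theorem dlDigitChar_toNat (d : Nat) (h : d < 10) : (Nat.digitChar d).toNat = 48 + d := by
  interval_cases d <;> decide

theorem dlDigitChar_isDigit (d : Nat) (h : d < 10) : '0' ≤ Nat.digitChar d ∧ Nat.digitChar d ≤ '9' := by
  interval_cases d <;> exact ⟨by decide, by decide⟩

theorem dlVal_append (ds : List Char) (c : Char) :
    dlVal (ds ++ [c]) = dlVal ds * 10 + (c.toNat - 48) := by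
  unfold dlVal
  rw [List.foldl_append, List.foldl_cons, List.foldl_nil]

-- characterisation of Nat.toDigits 10
theorem dlToDigits (k : Nat) :
    (∀ c ∈ Nat.toDigits 10 k, '0' ≤ c ∧ c ≤ '9') ∧ dlVal (Nat.toDigits 10 k) = k := by
  induction k using Nat.strong_induction_on with
  | _ k ih =>
    by_cases hk : k < 10
    · rw [Nat.toDigits_of_lt_base hk]
      refine ⟨?_, ?_⟩
      · intro c hc
        rw [List.mem_singleton] at hc
        subst hc
        exact dlDigitChar_isDigit k hk
      · unfold dlVal
        rw [List.foldl_cons, List.foldl_nil, dlDigitChar_toNat k hk]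
        omega
    · rw [Nat.toDigits_eq_if (by omega), if_neg hk]
      have hlt : k / 10 < k := by omega
      obtain ⟨ihd, ihv⟩ := ih (k / 10) hlt
      refine ⟨?_, ?_⟩
      · intro c hc
        rw [List.mem_append] at hc
        rcases hc with hc | hc
        · exact ihd c hc
        · rw [List.mem_singleton] at hc
          subst hc
          exact dlDigitChar_isDigit _ (Nat.mod_lt _ (by omega))
      · rw [dlVal_append, ihv, dlDigitChar_toNat _ (Nat.mod_lt _ (by omega))]
        omega

theorem dlToDigits_ne_nil (k : Nat) : Nat.toDigits 10 k ≠ [] := by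
  have := @Nat.length_toDigits_pos 10 k
  intro h; rw [h] at this; simp at this

-- str(n) is injective
theorem dlToChars_inj (a b : Int) (h : PySem.Int.toChars a = PySem.Int.toChars b) : a = b := by
  have hdig : ∀ x y : Nat, ('-' :: Nat.toDigits 10 x) ≠ Nat.toDigits 10 y := by
    intro x y he
    have hd := (dlToDigits y).1 '-' (by rw [← he]; exact List.mem_cons_self ..)
    exact absurd hd.1 (by decide)
  unfold PySem.Int.toChars at h
  split_ifs at h with ha hb hb
  · have : a.natAbs = b.natAbs := by
      have h' := List.cons.inj h
      have := congrArg dlVal h'.2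
      rw [(dlToDigits a.natAbs).2, (dlToDigits b.natAbs).2] at this
      exact this
    omega
  · exact absurd h (hdig _ _)
  · exact absurd h.symm (hdig _ _)
  · have := congrArg dlVal h
    rw [(dlToDigits a.toNat).2, (dlToDigits b.toNat).2] at this
    omega

theorem dlStartswith_not_dash (l : List Char) (h : l.head? ≠ some '-') :
    PySem.Chars.startswith l ['-'] = false := by
  cases l with
  | nil => rfl
  | cons c r =>
    simp only [List.head?_cons, ne_eq, Option.some_inj] at h
    simp [PySem.Chars.startswith, List.isPrefixOf, Ne.symm h]

theorem dlStartswith_dash (r : List Char) : PySem.Chars.startswith ('-' :: r) ['-'] = true := by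
  simp [PySem.Chars.startswith, List.isPrefixOf]

theorem dlStartswith_head (l : List Char) (p : Char) :
    PySem.Chars.startswith l [p] = (l.head? == some p) := by
  cases l with
  | nil => rfl
  | cons c r =>
    by_cases hc : c = p
    · simp [PySem.Chars.startswith, List.isPrefixOf, hc]
    · simp [PySem.Chars.startswith, List.isPrefixOf, hc, Ne.symm hc]

theorem dlSliceTail (k : String) :
    (PySem.Str.slice k (some 1) none).toList = k.toList.drop 1 := by
  simp [pysem]

-- the stripped digit part of str(n) is its digit list, which passes strIsdigit
theorem dlToChars_shape (n : Int) :
    (if PySem.Chars.startswith (PySem.Int.toChars n) ['-'] then (PySem.Int.toChars n).drop 1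
     else PySem.Int.toChars n) = Nat.toDigits 10 n.natAbs ∧
    PySem.Chars.strIsdigit (Nat.toDigits 10 n.natAbs) = true := by
  constructor
  · unfold PySem.Int.toChars
    by_cases hn : n < 0
    · rw [if_pos hn, dlStartswith_dash]
      simp
    · rw [if_neg hn]
      have hne : (Nat.toDigits 10 n.toNat).head? ≠ some '-' := by
        cases hl : Nat.toDigits 10 n.toNat with
        | nil => simp
        | cons c r =>
          simp only [List.head?_cons, ne_eq, Option.some_inj]
          intro he
          have hc := (dlToDigits n.toNat).1 c (by rw [hl]; simp)
          rw [he] at hc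
          exact absurd hc.1 (by decide)
      rw [dlStartswith_not_dash _ hne, if_neg (by simp)]
      congr 1
      omega
  · unfold PySem.Chars.strIsdigit
    rw [Bool.and_eq_true]
    constructor
    · simpa [List.isEmpty_iff] using dlToDigits_ne_nil n.natAbs
    · rw [List.all_eq_true]
      intro c hc
      obtain ⟨h1, h2⟩ := (dlToDigits n.natAbs).1 c hc
      simp [PySem.Chars.isdigit, h1, h2]

-- dlLabelNum? through the list of characters
def dlLabelNumL? (cs : List Char) : Option Int :=
  if cs.head? == some 'L' then
    if PySem.Chars.strIsdigit
        (if PySem.Chars.startswith (cs.drop 1) ['-'] then (cs.drop 1).drop 1 else cs.drop 1)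
    then PySem.Int.ofChars? (cs.drop 1) else none
  else none

theorem dlLabelNum?_eq (k : String) : dlLabelNum? k = dlLabelNumL? k.toList := by
  unfold dlLabelNum? dlLabelNumL?
  have hL : ("L".toList : List Char) = ['L'] := rfl
  rw [PySem.Str.startswith_eq, hL, dlStartswith_head]
  have htail : (PySem.Str.slice k (some 1) none).toList = k.toList.drop 1 := dlSliceTail k
  by_cases hh : (k.toList.head? == some 'L') = true
  · rw [hh]
    simp only [Bool.not_true, Bool.false_eq_true, if_false, if_true]
    have hd : (if PySem.Str.startswith (PySem.Str.slice k (some 1) none) "-" then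
          PySem.Str.slice (PySem.Str.slice k (some 1) none) (some 1) none
        else PySem.Str.slice k (some 1) none).toList =
        (if PySem.Chars.startswith (k.toList.drop 1) ['-'] then (k.toList.drop 1).drop 1
         else k.toList.drop 1) := by
      rw [apply_ite String.toList, dlSliceTail, htail, PySem.Str.startswith_eq, htail]
      rfl
    rw [PySem.Str.strIsdigit_eq, hd]
    by_cases hdg : PySem.Chars.strIsdigit
        (if PySem.Chars.startswith (k.toList.drop 1) ['-'] then (k.toList.drop 1).drop 1
         else k.toList.drop 1) = true
    · rw [hdg]
      simp only [Bool.not_true, Bool.false_eq_true, if_false, if_true]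
      show PySem.Int.ofChars? (PySem.Str.slice k (some 1) none).toList = _
      rw [htail]
    · rw [Bool.not_eq_true] at hdg
      rw [hdg]
      rfl
  · rw [Bool.not_eq_true] at hh
    rw [hh]
    rfl

-- the bridge: under a canonical key, B's parse succeeds exactly on A's generated labels
theorem dlBridge (k : String) (hok : dlKeyOk k = true) (n : Int) :
    dlLabelNum? k = some n ↔ k = dlMkLabel n := by
  rw [dlLabelNum?_eq]
  unfold dlKeyOk dlKeyOkL at hok
  unfold dlLabelNumL?
  constructor
  · intro h
    by_cases h1 : (k.toList.head? == some 'L') = true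
    · rw [if_pos h1] at h hok
      by_cases h2 : PySem.Chars.strIsdigit
          (if PySem.Chars.startswith (k.toList.drop 1) ['-'] then (k.toList.drop 1).drop 1
           else k.toList.drop 1) = true
      · rw [if_pos h2] at h
        rw [h2] at hok
        simp only [Bool.not_true, Bool.false_or, beq_iff_eq] at hok
        rw [h, Option.getD_some] at hok
        cases hcl : k.toList with
        | nil => rw [hcl] at h1; exact absurd h1 (by simp)
        | cons c t =>
          have hcL : c = 'L' := by rw [hcl] at h1; simpa using h1
          have hteq : PySem.Int.toChars n = t := by rw [hcl] at hok; simpa using hok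
          have hk : String.ofList k.toList = k := String.ofList_toList
          rw [← hk, hcl, hcL, ← hteq]
          rfl
      · rw [if_neg h2] at h
        exact absurd h (by simp)
    · rw [if_neg h1] at h
      exact absurd h (by simp)
  · rintro rfl
    have hl : (dlMkLabel n).toList = 'L' :: PySem.Int.toChars n := by
      unfold dlMkLabel
      rw [String.toList_ofList]
    rw [hl] at hok ⊢
    simp only [List.head?_cons, List.drop_succ_cons, List.drop_zero, beq_self_eq_true,
      if_true] at hok ⊢
    obtain ⟨hds, hdig⟩ := dlToChars_shape n
    rw [hds, hdig] at hok ⊢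
    simp only [Bool.not_true, Bool.false_or, beq_iff_eq, if_true] at hok ⊢
    cases h : PySem.Int.ofChars? (PySem.Int.toChars n) with
    | some m =>
      rw [h, Option.getD_some] at hok
      rw [dlToChars_inj m n hok]
    | none =>
      rw [h, Option.getD_none] at hok
      obtain rfl : (0 : Int) = n := dlToChars_inj 0 n hok
      exact absurd h (by decide)

theorem dlUnreachable_iff (gaps : List (Int × Int)) (k : String) (hok : dlKeyOk k = true) :
    dlUnreachable gaps k = true ↔
      ∃ n : Int, k = dlMkLabel n ∧ ∃ iv ∈ gaps, iv.1 ≤ n ∧ n ≤ iv.2 := by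
  unfold dlUnreachable
  cases hc : dlLabelNum? k with
  | none =>
    simp only [Bool.false_eq_true, false_iff]
    rintro ⟨n, rfl, -⟩
    have := (dlBridge (dlMkLabel n) hok n).mpr rfl
    rw [hc] at this
    exact absurd this (by simp)
  | some n0 =>
    have hk : k = dlMkLabel n0 := (dlBridge k hok n0).mp hc
    simp only [List.any_eq_true, Bool.and_eq_true, decide_eq_true_eq]
    constructor
    · rintro ⟨iv, hiv, h1, h2⟩
      exact ⟨n0, hk, iv, hiv, h1, h2⟩
    · rintro ⟨n, hkn, iv, hiv, h1, h2⟩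
      have hn : n = n0 := by
        have := (dlBridge k hok n).mpr hkn
        rw [hc] at this
        exact (Option.some_inj.mp this).symm
      subst hn
      exact ⟨iv, hiv, h1, h2⟩

theorem dlGapIv_mem (kv : String × List (List String)) (iv : Int × Int) :
    iv ∈ dlGapIv kv ↔ ∃ ins, dlGotoOf kv.2 = some ins ∧
      kv.1 < (PySem.List.pyGet? ins 1).getD "" ∧
      iv = (dlNum kv.1 + 1, dlNum ((PySem.List.pyGet? ins 1).getD "") - 1) := by
  unfold dlGapIv
  cases hg : dlGotoOf kv.2 with
  | none => simp
  | some ins =>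
    simp only [Option.some_inj]
    constructor
    · intro h
      split_ifs at h with hcond
      · rw [List.mem_singleton] at h
        exact ⟨ins, rfl, hcond, h⟩
      · exact absurd h (List.not_mem_nil)
    · rintro ⟨ins', rfl, hcond, rfl⟩
      rw [if_pos hcond]
      exact List.mem_singleton.mpr rfl

theorem dlGapLabels_mem (Lt : String × String) (k : String) :
    k ∈ dlGapLabels Lt ↔ Lt.1 < Lt.2 ∧
      ∃ m : Int, dlNum Lt.1 + 1 ≤ m ∧ m ≤ dlNum Lt.2 - 1 ∧ k = dlMkLabel m := by
  unfold dlGapLabels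
  by_cases hlt : Lt.1 < Lt.2
  · rw [if_pos hlt]
    simp only [List.mem_map, PySem.List.mem_pyRange_one, hlt, true_and]
    constructor
    · rintro ⟨i, hi, rfl⟩
      exact ⟨dlNum Lt.1 + (i + 1), by omega, by omega, rfl⟩
    · rintro ⟨m, h1, h2, rfl⟩
      refine ⟨m - dlNum Lt.1 - 1, ⟨by omega, by omega⟩, ?_⟩
      rw [show dlNum Lt.1 + (m - dlNum Lt.1 - 1 + 1) = m from by omega]
  · rw [if_neg hlt]
    simp [hlt]

theorem dlJumps_mem (P : List (String × List (List String))) (Lt : String × String) :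
    Lt ∈ dlJumps P ↔ ∃ kv ∈ P, ∃ ins, dlGotoOf kv.2 = some ins ∧
      Lt = (kv.1, (PySem.List.pyGet? ins 1).getD "") := by
  unfold dlJumps
  rw [List.mem_filterMap]
  constructor
  · rintro ⟨kv, hkv, hmap⟩
    rw [Option.map_eq_some_iff] at hmap
    obtain ⟨ins, hins, hLt⟩ := hmap
    exact ⟨kv, hkv, ins, hins, hLt.symm⟩
  · rintro ⟨kv, hkv, ins, hins, rfl⟩
    exact ⟨kv, hkv, by rw [hins]; rfl⟩

theorem dl_member (P : List (String × List (List String))) (k : String) (hok : dlKeyOk k = true) :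
    ((dlJumps P).flatMap dlGapLabels).contains k = dlUnreachable (P.flatMap dlGapIv) k := by
  rw [Bool.eq_iff_iff, List.contains_iff_exists_mem_beq]
  simp only [beq_iff_eq]
  rw [dlUnreachable_iff _ _ hok]
  constructor
  · rintro ⟨x, hx, rfl⟩
    rw [List.mem_flatMap] at hx
    obtain ⟨Lt, hLt, hxg⟩ := hx
    rw [dlGapLabels_mem] at hxg
    obtain ⟨hlt, m, h1, h2, rfl⟩ := hxg
    rw [dlJumps_mem] at hLt
    obtain ⟨kv, hkv, ins, hins, hLteq⟩ := hLt
    refine ⟨m, rfl, (dlNum Lt.1 + 1, dlNum Lt.2 - 1), ?_, by omega, by omega⟩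
    rw [List.mem_flatMap]
    refine ⟨kv, hkv, ?_⟩
    rw [dlGapIv_mem]
    refine ⟨ins, hins, ?_, ?_⟩
    · rw [hLteq] at hlt
      exact hlt
    · rw [hLteq]
  · rintro ⟨n, rfl, iv, hiv, hlo, hhi⟩
    rw [List.mem_flatMap] at hiv
    obtain ⟨kv, hkv, hivg⟩ := hiv
    rw [dlGapIv_mem] at hivg
    obtain ⟨ins, hins, hclt, rfl⟩ := hivg
    refine ⟨dlMkLabel n, ?_, rfl⟩
    rw [List.mem_flatMap]
    refine ⟨(kv.1, (PySem.List.pyGet? ins 1).getD ""), ?_, ?_⟩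
    · rw [dlJumps_mem]
      exact ⟨kv, hkv, ins, hins, rfl⟩
    · rw [dlGapLabels_mem]
      simp only at hlo hhi ⊢
      exact ⟨hclt, n, by omega, by omega, rfl⟩

theorem dl_sj_aux (Q : List (String × List (List String))) (sj : PySem.Dict String String)
    (hfresh : ∀ kv ∈ Q, sj.contains kv.1 = false) (hnd : (Q.map Prod.fst).Nodup) :
    (Q.foldl (fun sj kv => match dlGotoOf kv.2 with
        | some ins => sj.insert kv.1 ((PySem.List.pyGet? ins 1).getD "")
        | none => sj) sj).items = sj.items ++ dlJumps Q := by
  induction Q generalizing sj with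
  | nil => simp [dlJumps]
  | cons kv rest ih =>
    rw [List.foldl_cons]
    cases hg : dlGotoOf kv.2 with
    | none =>
      rw [ih sj (fun kv' h' => hfresh kv' (List.mem_cons_of_mem _ h')) (by simpa using hnd.of_cons)]
      simp [dlJumps, hg]
    | some ins =>
      have hc : sj.contains kv.1 = false := hfresh kv (List.mem_cons_self ..)
      have hfresh' : ∀ kv' ∈ rest, (sj.insert kv.1 ((PySem.List.pyGet? ins 1).getD "")).contains kv'.1 = false := by
        intro kv' h'
        rw [PySem.Dict.contains_insert]
        have hne : kv'.1 ≠ kv.1 := by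
          simp only [List.map_cons, List.nodup_cons] at hnd
          intro he; exact hnd.1 (he ▸ (List.mem_map_of_mem h'))
        simp [hne, hfresh kv' (List.mem_cons_of_mem _ h')]
      rw [ih _ hfresh' (by simpa using hnd.of_cons)]
      rw [PySem.Dict.items_insert_of_not_contains _ _ hc]
      simp [dlJumps, hg]

theorem dl_delete (ks : List String) (d : PySem.Dict String (List (List String))) :
    (ks.foldl (fun p label => if p.contains label then p.erase label else p) d).items =
      d.items.filter (fun kv => !(ks.contains kv.1)) := by
  induction ks generalizing d with
  | nil => simp
  | cons l ks ih =>
    rw [List.foldl_cons, ih]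
    have hstep : (if d.contains l then d.erase l else d).items = d.items.filter (fun p => !(p.1 == l)) := by
      by_cases h : d.contains l = true
      · simp [h, PySem.Dict.erase]
      · rw [if_neg (by simp [h])]
        have h' : d.items.any (fun p => p.1 == l) = false := by
          rw [Bool.eq_false_iff]; intro hq; exact h hq
        rw [List.any_eq_false] at h'
        symm
        apply List.filter_eq_self.mpr
        intro p hp
        simpa using h' p hp
    rw [hstep, List.filter_filter]
    apply List.filter_congr
    intro x _
    by_cases hx : x.1 = l <;> simp [hx, Bool.and_comm]

theorem dl_inner_false (label : String) (instrs : List (List String)) (st : PySem.Dict String String × Bool) (h : st.2 = false) :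
    instrs.foldl
        (fun (st : PySem.Dict String String × Bool) i =>
          if ((PySem.List.pyGet? i 0).getD "" == "goto") && st.2 then
            (st.1.insert label ((PySem.List.pyGet? i 1).getD ""), false)
          else st)
        st = st := by
  induction instrs generalizing st with
  | nil => rfl
  | cons i rest ih =>
    have : (if ((PySem.List.pyGet? i 0).getD "" == "goto") && st.2 then
        (st.1.insert label ((PySem.List.pyGet? i 1).getD ""), false) else st) = st := by
      rw [if_neg]; simp [h]
    rw [List.foldl_cons, this]; exact ih st h

theorem dl_inner (label : String) (instrs : List (List String)) (sj : PySem.Dict String String) :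
    (instrs.foldl
        (fun (st : PySem.Dict String String × Bool) i =>
          if ((PySem.List.pyGet? i 0).getD "" == "goto") && st.2 then
            (st.1.insert label ((PySem.List.pyGet? i 1).getD ""), false)
          else st)
        (sj, true)).1 =
      match dlGotoOf instrs with
      | some ins => sj.insert label ((PySem.List.pyGet? ins 1).getD "")
      | none => sj := by
  induction instrs generalizing sj with
  | nil => rfl
  | cons i rest ih =>
    rw [List.foldl_cons]
    by_cases hp : ((PySem.List.pyGet? i 0).getD "" == "goto") = true
    · rw [if_pos (by simp [hp]), dl_inner_false label rest _ rfl]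
      simp [dlGotoOf, List.find?_cons_of_pos (p := fun ins => (PySem.List.pyGet? ins 0).getD "" == "goto") hp]
    · rw [if_neg (by simp [hp])]
      have hfind : dlGotoOf (i :: rest) = dlGotoOf rest := by
        unfold dlGotoOf
        rw [List.find?_cons_of_neg]
        simpa using hp
      rw [hfind]; exact ih sj

theorem dl_setjumps_items (P : List (String × List (List String))) (hnd : (P.map Prod.fst).Nodup) :
    (P.foldl (fun sj kv =>
        (((((PySem.Dict.mk P).get? kv.1).getD []).foldl
            (fun (st : PySem.Dict String String × Bool) i =>
              if ((PySem.List.pyGet? i 0).getD "" == "goto") && st.2 then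
                (st.1.insert kv.1 ((PySem.List.pyGet? i 1).getD ""), false)
              else st)
            (sj, true))).1)
        PySem.Dict.empty).items = dlJumps P := by
  have hcongr : ∀ (sj : PySem.Dict String String), ∀ kv ∈ P,
      (((((PySem.Dict.mk P).get? kv.1).getD []).foldl
          (fun (st : PySem.Dict String String × Bool) i =>
            if ((PySem.List.pyGet? i 0).getD "" == "goto") && st.2 then
              (st.1.insert kv.1 ((PySem.List.pyGet? i 1).getD ""), false)
            else st)
          (sj, true))).1 =
        match dlGotoOf kv.2 with
        | some ins => sj.insert kv.1 ((PySem.List.pyGet? ins 1).getD "")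
        | none => sj := by
    intro sj kv hm
    have hget : (PySem.Dict.mk P).get? kv.1 = some kv.2 := by
      apply PySem.Dict.get?_of_mem_items
      · exact hm
      · exact hnd
    rw [hget, Option.getD_some, dl_inner]
  rw [PySem.List.foldl_congr_mem P _ _ _ hcongr]
  rw [dl_sj_aux P PySem.Dict.empty (fun kv _ => PySem.Dict.contains_empty kv.1) hnd]
  rfl

theorem dl_unreach (J : List (String × String)) :
    (J.foldl (fun acc Lt =>
      if Lt.1 < Lt.2 then
        (PySem.List.pyRange 0 ((PySem.Int.ofStr? (PySem.Str.slice Lt.2 (some 1) none)).getD 0 -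
            ((PySem.Int.ofStr? (PySem.Str.slice Lt.1 (some 1) none)).getD 0 + 1)) 1).foldl
          (fun acc2 i => acc2 ++ [dlMkLabel ((PySem.Int.ofStr? (PySem.Str.slice Lt.1 (some 1) none)).getD 0 + (i + 1))]) acc
      else acc) []) = J.flatMap dlGapLabels := by
  have hcongr : ∀ (acc : List String), ∀ Lt ∈ J,
      (if Lt.1 < Lt.2 then
        (PySem.List.pyRange 0 ((PySem.Int.ofStr? (PySem.Str.slice Lt.2 (some 1) none)).getD 0 -
            ((PySem.Int.ofStr? (PySem.Str.slice Lt.1 (some 1) none)).getD 0 + 1)) 1).foldl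
          (fun acc2 i => acc2 ++ [dlMkLabel ((PySem.Int.ofStr? (PySem.Str.slice Lt.1 (some 1) none)).getD 0 + (i + 1))]) acc
      else acc) = acc ++ dlGapLabels Lt := by
    intro acc Lt _
    by_cases hlt : Lt.1 < Lt.2
    · rw [if_pos hlt, PySem.List.foldl_append_singleton_eq_map]
      unfold dlGapLabels dlNum
      rw [if_pos hlt]
    · rw [if_neg hlt]
      unfold dlGapLabels
      rw [if_neg hlt, List.append_nil]
  rw [PySem.List.foldl_congr_mem J _ _ _ hcongr, PySem.List.foldl_append_eq_flatMap, List.nil_append]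

theorem dl_gaps (P : List (String × List (List String))) :
    (P.foldl (fun acc kv =>
      match dlGotoOf kv.2 with
      | none => acc
      | some ins =>
        let target := (PySem.List.pyGet? ins 1).getD ""
        if kv.1 < target then
          acc ++ [((PySem.Int.ofStr? (PySem.Str.slice kv.1 (some 1) none)).getD 0 + 1,
                   (PySem.Int.ofStr? (PySem.Str.slice target (some 1) none)).getD 0 - 1)]
        else acc) []) = P.flatMap dlGapIv := by
  have hcongr : ∀ (acc : List (Int × Int)), ∀ kv ∈ P,
      (match dlGotoOf kv.2 with
      | none => acc
      | some ins =>
        let target := (PySem.List.pyGet? ins 1).getD ""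
        if kv.1 < target then
          acc ++ [((PySem.Int.ofStr? (PySem.Str.slice kv.1 (some 1) none)).getD 0 + 1,
                   (PySem.Int.ofStr? (PySem.Str.slice target (some 1) none)).getD 0 - 1)]
        else acc) = acc ++ dlGapIv kv := by
    intro acc kv _
    unfold dlGapIv dlNum
    cases hg : dlGotoOf kv.2 with
    | none => simp
    | some ins => simp only []; split_ifs <;> simp_all
  rw [PySem.List.foldl_congr_mem P _ _ _ hcongr, PySem.List.foldl_append_eq_flatMap, List.nil_append]

-- ===== VERDICT (by name: the statement is the Claim_ definition above) =====
theorem deleteLabel_spec : Claim_equal_deleteLabel := by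
  intro P _ hpre
  obtain ⟨hnd, hall⟩ := hpre
  unfold Spec_deleteLabel
  simp only [deleteLabel, deleteLabel_alt]
  rw [dl_setjumps_items P hnd, dl_unreach, dl_gaps]
  have hmk : (PySem.Dict.mk P).items = P := rfl
  rw [dl_delete, hmk]
  apply List.filter_congr
  intro kv hkv
  have hok : dlKeyOk kv.1 = true := by
    have h := List.all_eq_true.mp hall kv hkv
    rw [Bool.and_eq_true, Bool.and_eq_true] at h
    exact h.1.2
  rw [dl_member _ _ hok]
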